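-- pv_equiv track=rewrite | github.com/EsterHlav/Contextualized-Word-Vectors-CoVe-Learned-in-Translation | NMT.py | bleu_process_tok
-- ===== SOURCE A (Python) =====
-- def bleu_process_tok(s, mode='pred'):
--     s = s.split(" ")
--     out = []
--     for w in s:
--         if w != '<s>' and w != '</s>':
--             out.append(w)
--         if w == '</s>':
--             if mode == 'tgt':
--                 return [out]
--             else:
--                 return out
--
--     if mode == 'tgt':
--         return [out]
--     else:
--         return out
-- ===== SOURCE B (Python) =====
-- def bleu_process_tok(s, mode='pred'):
--     toks = s.split(" ")
--     # Locate the cut point: position of the first '</s>', or the whole list.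
--     try:
--         end = toks.index('</s>')
--     except ValueError:
--         end = len(toks)
--     result = toks[:end]
--     # Destructively delete every '<s>' marker, one .remove per occurrence.
--     while '<s>' in result:
--         result.remove('<s>')
--     return [result] if mode == 'tgt' else result
-- ===== Notes on version B (the rewrite author's own statement) =====
-- stated objective: alternative
-- what changed: Replaces A's single fused loop (inline filtering plus early-return on '</s>') with an index-and-slice cut at the first '</s>' followed by a destructive while-loop that deletes '<s>' markers with list.remove.
-- outside the precondition, e.g. on bleu_process_tok('<s> a </s>', 'tgt'): A returns [['a']], B returns [['a']]
import Mathlib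
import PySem

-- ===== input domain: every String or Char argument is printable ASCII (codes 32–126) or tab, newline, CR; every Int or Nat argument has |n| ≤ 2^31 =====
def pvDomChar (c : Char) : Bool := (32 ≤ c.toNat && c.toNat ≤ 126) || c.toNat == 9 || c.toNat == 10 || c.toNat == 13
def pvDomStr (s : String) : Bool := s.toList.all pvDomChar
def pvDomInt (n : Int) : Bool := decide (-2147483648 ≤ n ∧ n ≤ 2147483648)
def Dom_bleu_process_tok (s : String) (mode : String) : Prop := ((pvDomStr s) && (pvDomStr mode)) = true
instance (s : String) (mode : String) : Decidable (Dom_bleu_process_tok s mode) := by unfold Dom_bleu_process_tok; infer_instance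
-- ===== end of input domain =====

-- B replaces A's fused loop (inline filter + early return on '</s>') with index/slice at the
-- first '</s>' plus a while-remove loop deleting '<s>' markers; Pre_ excludes mode = "tgt",
-- where A returns a nested list [out] that is not a value of the declared type List String.


-- ===== PORT A =====
-- s.split(" ") = Str.split? s " " (sep " " ≠ "" so it is always some; .getD [] only discharges the option).
-- A's loop: append w unless it is a marker; on '</s>' return out immediately.
-- (mode = "tgt" would return the nested list [out]; excluded by Pre_ below.)
def bleuLoopA : List String → List String → List String
  | [], out => out
  | w :: ws, out =>
      let out := if w ≠ "<s>" ∧ w ≠ "</s>" then out ++ [w] else out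
      if w = "</s>" then out else bleuLoopA ws out

def bleu_process_tok (s : String) (_mode : String) : List String :=
  bleuLoopA (((PySem.Str.split? s " ").getD [])) []

-- ===== PORT B =====
-- the 'while "<s>" in result: result.remove("<s>")' loop; each step deletes the first '<s>'.
def bleuRemoveLoop (l : List String) : List String :=
  if h : "<s>" ∈ l then
    bleuRemoveLoop ((PySem.List.remove? l "<s>").getD l)
  else l
termination_by l.length
decreasing_by
  rw [PySem.List.remove?_eq_some_erase _ _ h, Option.getD_some]
  have h1 := List.length_erase_of_mem h
  have h2 : 0 < l.length := List.length_pos_of_mem h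
  omega

def bleu_process_tok_alt (s : String) (_mode : String) : List String :=
  let toks := (PySem.Str.split? s " ").getD []
  -- try: end = toks.index('</s>')  except ValueError: end = len(toks)
  let endIdx : Int := match PySem.List.index? toks "</s>" with
    | some i => (i : Int)
    | none => (toks.length : Int)
  bleuRemoveLoop (PySem.List.slice toks none (some endIdx))

-- ===== PRECONDITION & SPEC =====
-- Pre_ excludes mode = "tgt": there A (and B) return a nested list [out], which is not a
-- value of the declared return type List String and so cannot be claimed here.
def Pre_bleu_process_tok (s : String) (mode : String) : Prop := mode ≠ "tgt"
instance (s : String) (mode : String) : Decidable (Pre_bleu_process_tok s mode) := by unfold Pre_bleu_process_tok; infer_instance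
def pvWitness_bleu_process_tok : String × String := ("<s> hello world </s> junk", "pred")

def Spec_bleu_process_tok (s : String) (mode : String) (out : List String) : Prop := out = bleu_process_tok_alt s mode
instance (s : String) (mode : String) (out : List String) : Decidable (Spec_bleu_process_tok s mode out) := by unfold Spec_bleu_process_tok; infer_instance

-- ===== CLAIM (what is proved, stated in full; the proofs are below) =====
def Claim_equal_bleu_process_tok : Prop := ∀ (s : String) (mode : String), Dom_bleu_process_tok s mode → Pre_bleu_process_tok s mode → Spec_bleu_process_tok s mode (bleu_process_tok s mode)

-- ===== LEMMAS AND PROOFS =====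
-- A's fused loop produces the filtered takeWhile-prefix.
theorem bleuLoopA_eq (ws : List String) : ∀ (out : List String),
    bleuLoopA ws out = out ++ (ws.takeWhile (fun w => w ≠ "</s>")).filter (fun w => w ≠ "<s>") := by
  induction ws with
  | nil => intro out; simp [bleuLoopA]
  | cons w ws ih =>
      intro out
      by_cases h : w = "</s>"
      · subst h; simp [bleuLoopA, List.takeWhile]
      · by_cases h2 : w = "<s>"
        · subst h2; simp [bleuLoopA, List.takeWhile, ih]
        · simp [bleuLoopA, List.takeWhile, h, h2, ih]

-- Erasing one '<s>' does not change the '<s>'-free filtrate.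
theorem filter_erase_marker (l : List String) :
    (l.erase "<s>").filter (fun w => w ≠ "<s>") = l.filter (fun w => w ≠ "<s>") := by
  induction l with
  | nil => rfl
  | cons a l ih =>
      by_cases ha : a = "<s>"
      · subst ha; simp
      · have he : (a :: l).erase "<s>" = a :: l.erase "<s>" := by
          simp [ha]
        rw [he, List.filter_cons, List.filter_cons, ih]

-- B's while-remove loop computes the same filter.
theorem bleuRemoveLoop_eq (l : List String) :
    bleuRemoveLoop l = l.filter (fun w => w ≠ "<s>") := by
  by_cases h : "<s>" ∈ l
  · rw [bleuRemoveLoop.eq_def]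
    simp only [h, dite_true]
    rw [PySem.List.remove?_eq_some_erase _ _ h, Option.getD_some]
    rw [bleuRemoveLoop_eq (l.erase "<s>")]
    exact filter_erase_marker l
  · rw [bleuRemoveLoop.eq_def]
    simp only [h, dite_false]
    symm
    exact List.filter_eq_self.mpr (fun x hx => by
      simp only [ne_eq, decide_eq_true_eq]
      exact fun e => h (e ▸ hx))
termination_by l.length
decreasing_by
  have h1 := List.length_erase_of_mem h
  have h2 : 0 < l.length := List.length_pos_of_mem h
  omega

-- takeWhile (≠ v) over a list without v is the list itself.
theorem takeWhile_ne_of_not_mem (v : String) (l : List String) (h : v ∉ l) :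
    l.takeWhile (fun w => w ≠ v) = l := by
  induction l with
  | nil => rfl
  | cons a l ih =>
      have ha : a ≠ v := fun e => h (e ▸ List.mem_cons_self)
      rw [List.takeWhile_cons, if_pos (by simp [ha]),
        ih (fun m => h (List.mem_cons_of_mem _ m))]

-- takeWhile (≠ v) over pre ++ v :: suf with v ∉ pre is pre.
theorem takeWhile_ne_append (v : String) (suf : List String) :
    ∀ pre : List String, v ∉ pre →
    (pre ++ v :: suf).takeWhile (fun w => w ≠ v) = pre := by
  intro pre
  induction pre with
  | nil => intro _; simp
  | cons a l ih =>
      intro h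
      have ha : a ≠ v := fun e => h (e ▸ List.mem_cons_self)
      rw [List.cons_append, List.takeWhile_cons, if_pos (by simp [ha]),
        ih (fun m => h (List.mem_cons_of_mem _ m))]

-- B's index-and-slice cut is the takeWhile-prefix.
theorem slice_index_eq_takeWhile (toks : List String) :
    PySem.List.slice toks none
      (some (match PySem.List.index? toks "</s>" with
             | some i => (i : Int) | none => (toks.length : Int)))
      = toks.takeWhile (fun w => w ≠ "</s>") := by
  cases hidx : PySem.List.index? toks "</s>" with
  | none =>
      have hnm : "</s>" ∉ toks := (PySem.List.index?_eq_none_iff _ _).mp hidx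
      simp only []
      rw [PySem.List.slice_to_natCast, List.take_length,
        takeWhile_ne_of_not_mem _ _ hnm]
  | some k =>
      obtain ⟨pre, suf, heq, hlen, hnm⟩ := (PySem.List.index?_eq_some_iff _ _ _).mp hidx
      subst heq; subst hlen
      simp only []
      rw [PySem.List.slice_to_natCast, List.take_left,
        takeWhile_ne_append _ _ _ hnm]

-- ===== VERDICT (by name: the statement is the Claim_ definition above) =====
theorem bleu_process_tok_spec : Claim_equal_bleu_process_tok := by
  intro s mode _ _
  unfold Spec_bleu_process_tok bleu_process_tok bleu_process_tok_alt
  simp only [slice_index_eq_takeWhile, bleuRemoveLoop_eq]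
  simpa using bleuLoopA_eq (((PySem.Str.split? s " ").getD [])) []
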